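-- pv_equiv track=rewrite | github.com/RescueDiver/arcs4 | reasoning/object_rule_engine.py | get_visible_edge_colors
-- ===== SOURCE A (Python) =====
-- def get_visible_edge_colors(patch):
--     h = len(patch)
--     w = len(patch[0]) if h else 0
--
--     top = set()
--     bottom = set()
--     left = set()
--     right = set()
--
--     for c in range(w):
--         for r in range(h):
--             if patch[r][c] != 0:
--                 top.add(patch[r][c])
--                 break
--
--     for c in range(w):
--         for r in range(h - 1, -1, -1):
--             if patch[r][c] != 0:
--                 bottom.add(patch[r][c])
--                 break
--
--     for r in range(h):
--         for c in range(w):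
--             if patch[r][c] != 0:
--                 left.add(patch[r][c])
--                 break
--
--     for r in range(h):
--         for c in range(w - 1, -1, -1):
--             if patch[r][c] != 0:
--                 right.add(patch[r][c])
--                 break
--
--     return {
--         "top": top,
--         "bottom": bottom,
--         "left": left,
--         "right": right,
--     }
-- ===== SOURCE B (Python) =====
-- def get_visible_edge_colors(patch):
--     h = len(patch)
--     w = len(patch[0]) if h else 0
--
--     top = set()
--     bottom = set()
--     left = set()
--     right = set()
--
--     # one forward pass per column: first non-zero -> top, last non-zero -> bottom
--     for c in range(w):
--         first = None
--         last = None
--         for r in range(h):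
--             v = patch[r][c]
--             if v != 0:
--                 if first is None:
--                     first = v
--                 last = v
--         if first is not None:
--             top.add(first)
--             bottom.add(last)
--
--     # one forward pass per row: first non-zero -> left, last non-zero -> right
--     for r in range(h):
--         first = None
--         last = None
--         for c in range(w):
--             v = patch[r][c]
--             if v != 0:
--                 if first is None:
--                     first = v
--                 last = v
--         if first is not None:
--             left.add(first)
--             right.add(last)
--
--     return {
--         "top": top,
--         "bottom": bottom,
--         "left": left,
--         "right": right,
--     }
-- ===== Notes on version B (the rewrite author's own statement) =====
-- stated objective: alternative
-- what changed: Replaces A's four scans (forward and backward over each column and each row, with break) by two forward-only passes that track the first and the last non-zero element of each column/row simultaneously.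
import Mathlib
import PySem

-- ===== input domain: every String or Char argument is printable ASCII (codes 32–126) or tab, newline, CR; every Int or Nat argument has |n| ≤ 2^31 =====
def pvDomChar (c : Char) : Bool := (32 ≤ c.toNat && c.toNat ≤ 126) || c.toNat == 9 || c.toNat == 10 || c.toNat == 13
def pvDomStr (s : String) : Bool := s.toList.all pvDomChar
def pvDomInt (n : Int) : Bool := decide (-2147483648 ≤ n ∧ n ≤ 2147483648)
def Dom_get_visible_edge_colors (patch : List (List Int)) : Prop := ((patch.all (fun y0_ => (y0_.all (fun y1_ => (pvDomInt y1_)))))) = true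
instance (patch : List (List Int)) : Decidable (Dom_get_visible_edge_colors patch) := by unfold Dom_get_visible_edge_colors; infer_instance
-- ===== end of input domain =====

-- B replaces A's four scans (forward/backward over each column and row, with break) by two
-- forward-only passes tracking first and last non-zero per column/row; same cost, different decomposition.
-- Under Pre_ every index accessed is in range, so total getD-indexing is exact.

-- ===== PORT A =====
-- patch[r][c] (total form; exact under Pre_, where every accessed index is in range)
def pvAt (g : List (List Int)) (r c : Nat) : Int := (g.getD r []).getD c 0

-- 'for i in idxs: if f i != 0: <add f i>; break'  = first non-zero value along idxs
def pvFirst (f : Nat → Int) : List Nat → Option Int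
  | [] => none
  | i :: is => if f i ≠ 0 then some (f i) else pvFirst f is

def get_visible_edge_colors (patch : List (List Int)) : List (String × List Int) :=
  let h := patch.length
  let w := if h = 0 then 0 else (patch.headD []).length
  let top : PySem.Set Int := (List.range w).foldl (fun s c =>
      match pvFirst (fun r => pvAt patch r c) (List.range h) with
      | some v => PySem.Set.add s v
      | none => s) PySem.Set.empty
  let bottom : PySem.Set Int := (List.range w).foldl (fun s c =>
      match pvFirst (fun r => pvAt patch r c) (List.range h).reverse with
      | some v => PySem.Set.add s v
      | none => s) PySem.Set.empty
  let left : PySem.Set Int := (List.range h).foldl (fun s r =>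
      match pvFirst (fun c => pvAt patch r c) (List.range w) with
      | some v => PySem.Set.add s v
      | none => s) PySem.Set.empty
  let right : PySem.Set Int := (List.range h).foldl (fun s r =>
      match pvFirst (fun c => pvAt patch r c) (List.range w).reverse with
      | some v => PySem.Set.add s v
      | none => s) PySem.Set.empty
  [("top", top), ("bottom", bottom), ("left", left), ("right", right)]

-- ===== PORT B =====
-- the inner forward loop of B: carries (first, last) through the indices
def pvFL (f : Nat → Int) (idxs : List Nat) (first last : Option Int) : Option Int × Option Int :=
  match idxs with
  | [] => (first, last)
  | i :: is =>
    let v := f i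
    if v ≠ 0 then pvFL f is (if first = none then some v else first) (some v)
    else pvFL f is first last

def get_visible_edge_colors_alt (patch : List (List Int)) : List (String × List Int) :=
  let h := patch.length
  let w := if h = 0 then 0 else (patch.headD []).length
  let tb : PySem.Set Int × PySem.Set Int := (List.range w).foldl (fun tb c =>
      let fl := pvFL (fun r => pvAt patch r c) (List.range h) none none
      match fl.1 with
      | some f =>
        (PySem.Set.add tb.1 f,
         match fl.2 with
         | some l => PySem.Set.add tb.2 l
         | none => tb.2)
      | none => tb) (PySem.Set.empty, PySem.Set.empty)
  let lr : PySem.Set Int × PySem.Set Int := (List.range h).foldl (fun lr r =>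
      let fl := pvFL (fun c => pvAt patch r c) (List.range w) none none
      match fl.1 with
      | some f =>
        (PySem.Set.add lr.1 f,
         match fl.2 with
         | some l => PySem.Set.add lr.2 l
         | none => lr.2)
      | none => lr) (PySem.Set.empty, PySem.Set.empty)
  [("top", tb.1), ("bottom", tb.2), ("left", lr.1), ("right", lr.2)]

-- ===== PRECONDITION & SPEC =====
-- Pre_ excludes exactly the ragged grids on which A raises IndexError: if any row is shorter
-- than row 0, A's backward scan over that row hits patch[r][w-1] and raises.
def Pre_get_visible_edge_colors (patch : List (List Int)) : Prop :=
  ∀ row ∈ patch, (patch.headD []).length ≤ row.length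
instance (patch : List (List Int)) : Decidable (Pre_get_visible_edge_colors patch) := by
  unfold Pre_get_visible_edge_colors; infer_instance
def pvWitness_get_visible_edge_colors : List (List Int) := [[1, 0], [0, 2]]

def Spec_get_visible_edge_colors (patch : List (List Int)) (out : List (String × List Int)) : Prop := out = get_visible_edge_colors_alt patch
instance (patch : List (List Int)) (out : List (String × List Int)) : Decidable (Spec_get_visible_edge_colors patch out) := by unfold Spec_get_visible_edge_colors; infer_instance

-- ===== CLAIM (what is proved, stated in full; the proofs are below) =====
def Claim_equal_get_visible_edge_colors : Prop := ∀ (patch : List (List Int)), Dom_get_visible_edge_colors patch → Pre_get_visible_edge_colors patch → Spec_get_visible_edge_colors patch (get_visible_edge_colors patch)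

-- ===== LEMMAS AND PROOFS =====

theorem pvFirst_append (f : Nat → Int) (xs ys : List Nat) :
    pvFirst f (xs ++ ys) = (pvFirst f xs).or (pvFirst f ys) := by
  induction xs with
  | nil => simp [pvFirst]
  | cons x xs ih =>
    simp only [List.cons_append, pvFirst]
    split_ifs with h
    · simp [Option.or]
    · simpa using ih

theorem pvFirst_none_iff (f : Nat → Int) (xs : List Nat) :
    pvFirst f xs = none ↔ ∀ i ∈ xs, f i = 0 := by
  induction xs with
  | nil => simp [pvFirst]
  | cons x xs ih =>
    simp only [pvFirst]
    split_ifs with h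
    · simp [h]
    · simp at h; simp [ih, h]

theorem pvFirst_reverse_none (f : Nat → Int) (xs : List Nat) :
    pvFirst f xs.reverse = none ↔ pvFirst f xs = none := by
  simp [pvFirst_none_iff]

theorem pvFL_eq (f : Nat → Int) (idxs : List Nat) :
    ∀ first last, pvFL f idxs first last
      = (first.or (pvFirst f idxs), (pvFirst f idxs.reverse).or last) := by
  induction idxs with
  | nil => intro first last; simp [pvFL, pvFirst]
  | cons i is ih =>
    intro first last
    by_cases h : f i = 0
    · have hne : ¬ (f i ≠ 0) := by simpa using h
      simp only [pvFL, if_neg hne, ih, pvFirst, List.reverse_cons, pvFirst_append,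
        Prod.mk.injEq]
      constructor
      · simp
      · cases pvFirst f is.reverse <;> simp [Option.or]
    · simp only [pvFL, if_pos h, ih, pvFirst, List.reverse_cons, pvFirst_append,
        Prod.mk.injEq]
      constructor
      · cases first <;> simp [Option.or]
      · cases pvFirst f is.reverse <;> simp [Option.or]

/-- B's paired fold over `cs` equals A's two separate folds (top-side and bottom-side). -/
theorem pvFoldPair (get : Nat → Nat → Int) (idxs : List Nat) (cs : List Nat) :
    ∀ (t b : PySem.Set Int),
    cs.foldl (fun tb c =>
      let fl := pvFL (get c) idxs none none
      match fl.1 with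
      | some f =>
        (PySem.Set.add tb.1 f,
         match fl.2 with
         | some l => PySem.Set.add tb.2 l
         | none => tb.2)
      | none => tb) (t, b)
    = (cs.foldl (fun s c =>
        match pvFirst (get c) idxs with
        | some v => PySem.Set.add s v
        | none => s) t,
       cs.foldl (fun s c =>
        match pvFirst (get c) idxs.reverse with
        | some v => PySem.Set.add s v
        | none => s) b) := by
  induction cs with
  | nil => intro t b; simp
  | cons c cs ih =>
    simp only [List.foldl_cons, pvFL_eq, Option.none_or, Option.or_none] at ih ⊢
    intro t b
    rcases h1 : pvFirst (get c) idxs with _ | v1 <;>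
      rcases h2 : pvFirst (get c) idxs.reverse with _ | v2
    · exact ih t b
    · have h3 := (pvFirst_reverse_none (get c) idxs).mpr h1
      rw [h2] at h3; exact absurd h3 (by simp)
    · have h3 := (pvFirst_reverse_none (get c) idxs).mp h2
      rw [h1] at h3; exact absurd h3 (by simp)
    · exact ih _ _

-- ===== VERDICT (by name: the statement is the Claim_ definition above) =====
theorem get_visible_edge_colors_spec : Claim_equal_get_visible_edge_colors := by
  intro patch _ _
  unfold Spec_get_visible_edge_colors get_visible_edge_colors get_visible_edge_colors_alt
  simp only [pvFoldPair]
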